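-- pv_equiv track=rewrite | github.com/SaadAhmedQadeer/Meta-Hacker-Cup-2025-ai-Track | solution  Round 2 question 04.py | string_subtract_one
-- ===== SOURCE A (Python) =====
-- def string_subtract_one(s):
--     """Subtract 1 from a numeric string."""
--     digits = list(s)
--     i = len(digits) - 1
--
--     while i >= 0:
--         if digits[i] != '0':
--             digits[i] = str(int(digits[i]) - 1)
--             break
--         digits[i] = '9'
--         i -= 1
--
--     # Remove leading zeros
--     result = ''.join(digits).lstrip('0')
--     return result if result else '0'
-- ===== SOURCE B (Python) =====
-- def string_subtract_one(s):
--     """Subtract 1 from a numeric string."""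
--     stripped = s.rstrip('0')
--     nines = '9' * (len(s) - len(stripped))
--     if stripped:
--         out = stripped[:-1] + str(int(stripped[-1]) - 1) + nines
--     else:
--         out = nines
--     return out.lstrip('0') or '0'
-- ===== Notes on version B (the rewrite author's own statement) =====
-- stated objective: simpler
-- what changed: Replaces the per-digit list-mutation borrow loop (scan from the right, rewriting each trailing '0' to '9' one element at a time) with bulk string operations: rstrip('0') finds the whole trailing-zero run at once, the pivot digit is decremented by slicing, and the nines are appended as one replicated string.
import Mathlib
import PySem

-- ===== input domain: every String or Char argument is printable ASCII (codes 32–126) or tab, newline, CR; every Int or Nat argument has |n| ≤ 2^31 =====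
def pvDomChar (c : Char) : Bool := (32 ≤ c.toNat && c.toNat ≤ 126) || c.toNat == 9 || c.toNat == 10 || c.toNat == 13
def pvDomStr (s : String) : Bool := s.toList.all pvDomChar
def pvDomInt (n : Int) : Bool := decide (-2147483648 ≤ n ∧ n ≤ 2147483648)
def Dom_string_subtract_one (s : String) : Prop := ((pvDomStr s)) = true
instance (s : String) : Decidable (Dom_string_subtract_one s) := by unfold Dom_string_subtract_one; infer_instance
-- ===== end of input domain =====

-- B replaces A's per-digit borrow loop with bulk operations (rstrip the trailing zeros, decrement
-- the pivot by slicing, append replicated '9's); objective: simpler.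


-- ===== PORT A =====
-- str(int(c) - 1) on the single character c (the same snippet occurs verbatim in A and in B);
-- int(c) raises ValueError on a non-digit character — those inputs are excluded by Pre_ below,
-- and the `none` branch is unreachable under Pre_.
def pvDecDigit (c : Char) : List Char :=
  match PySem.Int.ofChars? [c] with
  | some n => PySem.Int.toChars (n - 1)
  | none => []

-- A's while-loop walks the digit list from index len-1 downwards, so it is transcribed as a
-- structural recursion over the REVERSED character list: each '0' becomes '9' and the scan
-- continues; the first non-'0' character is replaced by str(int(c)-1) and the scan breaks.
def pvLoopA : List Char → List Char
  | [] => []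
  | c :: rest =>
      if c ≠ '0' then (pvDecDigit c).reverse ++ rest
      else '9' :: pvLoopA rest

def string_subtract_one (s : String) : String :=
  let digits := (pvLoopA s.toList.reverse).reverse
  -- ''.join(digits).lstrip('0'): lstrip with the explicit char set {'0'} is exactly dropWhile (· == '0')
  let result := digits.dropWhile (· == '0')
  if result ≠ [] then String.ofList result else "0"

-- ===== PORT B =====
def string_subtract_one_alt (s : String) : String :=
  let t := s.toList
  -- s.rstrip('0') is exactly: reverse, drop the leading '0's, reverse back
  let stripped := (t.reverse.dropWhile (· == '0')).reverse
  let nines := List.replicate (t.length - stripped.length) '9'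
  let out :=
    match stripped.getLast? with
    | some c => stripped.dropLast ++ pvDecDigit c ++ nines   -- stripped[:-1] + str(int(stripped[-1]) - 1) + nines
    | none => nines
  -- out.lstrip('0') or '0'
  let res := out.dropWhile (· == '0')
  if res ≠ [] then String.ofList res else "0"

-- ===== PRECONDITION & SPEC =====
-- Pre_ excludes exactly the inputs on which Python A raises ValueError: those where the first
-- non-'0' character from the right exists but is not a decimal digit (int(c) fails).
def Pre_string_subtract_one (s : String) : Prop :=
  ((s.toList.reverse.dropWhile (· == '0')).head?.all
    fun c => decide ('1' ≤ c) && decide (c ≤ '9')) = true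
instance (s : String) : Decidable (Pre_string_subtract_one s) := by
  unfold Pre_string_subtract_one; infer_instance
def pvWitness_string_subtract_one : String := "120"

def Spec_string_subtract_one (s : String) (out : String) : Prop := out = string_subtract_one_alt s
instance (s : String) (out : String) : Decidable (Spec_string_subtract_one s out) := by unfold Spec_string_subtract_one; infer_instance

-- ===== CLAIM (what is proved, stated in full; the proofs are below) =====
def Claim_equal_string_subtract_one : Prop := ∀ (s : String), Dom_string_subtract_one s → Pre_string_subtract_one s → Spec_string_subtract_one s (string_subtract_one s)

-- ===== LEMMAS AND PROOFS =====

-- Characterisation of A's reversed borrow loop: it turns the leading run of '0's (the trailing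
-- zeros of the original string) into '9's and then splices in str(int(c)-1) for the pivot c.
theorem pvLoopA_eq (r : List Char) :
    pvLoopA r = List.replicate (r.takeWhile (· == '0')).length '9' ++
      (match r.dropWhile (· == '0') with
       | [] => []
       | c :: rs => (pvDecDigit c).reverse ++ rs) := by
  induction r with
  | nil => rfl
  | cons c rest ih =>
      by_cases h : c = '0'
      · subst h
        simp [pvLoopA, ih, List.replicate_succ]
      · simp [pvLoopA, h]

-- The two programs build the same character list before the final lstrip('0'): A's borrow loop
-- (in its pvLoopA_eq normal form, reversed back) equals B's slice-built list.
theorem pv_core (t : List Char) :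
    (List.replicate (t.reverse.takeWhile (· == '0')).length '9' ++
      (match t.reverse.dropWhile (· == '0') with
       | [] => []
       | c :: rs => (pvDecDigit c).reverse ++ rs)).reverse
    = (match ((t.reverse.dropWhile (· == '0')).reverse).getLast? with
       | some c => (t.reverse.dropWhile (· == '0')).reverse.dropLast ++ pvDecDigit c ++
                    List.replicate (t.length - ((t.reverse.dropWhile (· == '0')).reverse).length) '9'
       | none => List.replicate (t.length - ((t.reverse.dropWhile (· == '0')).reverse).length) '9') := by
  have hsplit := List.takeWhile_append_dropWhile (p := (· == '0')) (l := t.reverse)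
  have hlen : (t.reverse.takeWhile (· == '0')).length + (t.reverse.dropWhile (· == '0')).length
      = t.length := by
    have := congrArg List.length hsplit
    simp only [List.length_append, List.length_reverse] at this
    exact this
  rcases h : t.reverse.dropWhile (· == '0') with _ | ⟨c, rs⟩
  · rw [h] at hlen; simp_all
  · rw [h] at hlen; simp_all; omega

-- ===== VERDICT (by name: the statement is the Claim_ definition above) =====
theorem string_subtract_one_spec : Claim_equal_string_subtract_one := by
  intro s _ _
  unfold Spec_string_subtract_one string_subtract_one string_subtract_one_alt
  dsimp only
  rw [pvLoopA_eq, pv_core]
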